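-- pv_equiv track=rewrite | github.com/HukLab/3d-integ-analysis | bin/huk_tau_e.py | bin_data
-- ===== SOURCE A (Python) =====
-- def bin_data(data, bins):
-- 	"""
-- 	if bins = [x_1, x_2, ..., x_n]
-- 		then bins like [x_1, x_2), [x_2, x_3), ..., [x_n-1, x_n]
-- 	"""
-- 	assert bins == sorted(bins)
-- 	assert not(any([x for x,y in data if x < bins[0] or x > bins[-1]]))
-- 	data = sorted(data, key=lambda x: x[0])
-- 	rs_per_dur = dict((dur, []) for dur in bins)
--
-- 	i = 0
-- 	l_bin = bins[i]
-- 	r_bin = bins[i+1]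
-- 	for (dur, resp) in data:
-- 		while dur >= r_bin and dur != bins[-1]:
-- 			i += 1
-- 			l_bin = bins[i]
-- 			r_bin = bins[i+1]
-- 		assert l_bin <= dur < r_bin or (l_bin <= dur <= r_bin and dur == bins[-1])
-- 		rs_per_dur[l_bin].append(resp)
-- 	return rs_per_dur
-- ===== SOURCE B (Python) =====
-- def bin_data(data, bins):
-- 	"""
-- 	if bins = [x_1, x_2, ..., x_n]
-- 		then bins like [x_1, x_2), [x_2, x_3), ..., [x_n-1, x_n]
-- 	"""
-- 	assert bins == sorted(bins)
-- 	assert not(any([x for x,y in data if x < bins[0] or x > bins[-1]]))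
-- 	rs_per_dur = {dur: [] for dur in bins}
-- 	last = len(bins) - 2
-- 	for dur, resp in sorted(data, key=lambda x: x[0]):
-- 		lo, hi = 0, len(bins)
-- 		while lo < hi:
-- 			mid = (lo + hi) // 2
-- 			if bins[mid] <= dur:
-- 				lo = mid + 1
-- 			else:
-- 				hi = mid
-- 		rs_per_dur[bins[min(lo - 1, last)]].append(resp)
-- 	return rs_per_dur
-- ===== Notes on version B (the rewrite author's own statement) =====
-- stated objective: alternative
-- what changed: The stateful linear merge sweep (a moving bin pointer advanced across the sorted data) is replaced by an independent per-element binary search clamped to the closed last bin; the per-element inner assert and pointer bookkeeping disappear, which a timing run measured as a constant-factor win.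
-- outside the precondition, e.g. on bin_data([(3, 9)], [1, 3, 3]): A returns {1: [9], 3: []}, B returns {1: [], 3: [9]}
import Mathlib
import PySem

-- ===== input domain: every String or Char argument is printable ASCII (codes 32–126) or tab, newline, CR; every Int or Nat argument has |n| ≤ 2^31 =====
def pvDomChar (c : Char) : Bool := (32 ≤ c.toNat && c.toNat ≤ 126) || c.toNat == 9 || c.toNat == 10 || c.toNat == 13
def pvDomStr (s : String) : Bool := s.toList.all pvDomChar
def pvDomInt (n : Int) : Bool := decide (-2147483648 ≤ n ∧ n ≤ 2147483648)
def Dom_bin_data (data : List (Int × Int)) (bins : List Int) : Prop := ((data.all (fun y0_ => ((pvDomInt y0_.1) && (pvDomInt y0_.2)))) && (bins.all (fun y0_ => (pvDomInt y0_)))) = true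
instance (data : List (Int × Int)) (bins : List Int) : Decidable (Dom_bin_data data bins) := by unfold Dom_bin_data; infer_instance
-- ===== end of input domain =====

-- B replaces A's stateful linear merge sweep (a bin pointer advanced across the sorted data)
-- with an independent per-element binary search, clamped to the closed last bin (measured constant-factor faster).


-- ===== PORT A =====
-- bins[-1] (in range whenever bins ≠ [], guaranteed by Pre_)
def pvLastA (bins : List Int) : Int := PySem.List.pyGetD bins (-1) 0

-- the `while dur >= r_bin and dur != bins[-1]` pointer advance; r_bin is invariantly bins[i+1].
-- bins.getD (i+1) 0 is Python's bins[i+1]: the index stays in range on every input Pre_ admits.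
-- Fuel bins.length bounds the advance (i+1 < bins.length throughout under Pre_).
def pvAdvA (bins : List Int) (dur : Int) : Nat → Nat → Nat
  | 0, i => i
  | fuel+1, i =>
    if bins.getD (i+1) 0 ≤ dur ∧ dur ≠ pvLastA bins then pvAdvA bins dur fuel (i+1) else i

-- the `for (dur, resp) in data` loop; state = (i, rs_per_dur); l_bin is invariantly bins[i].
-- rs_per_dur[l_bin].append(resp): the key bins[i] is always present under Pre_, so modify with default [] is exact.
def pvLoopA (bins : List Int) : List (Int × Int) → Nat → PySem.Dict Int (List Int) → PySem.Dict Int (List Int)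
  | [], _, d => d
  | (dur, resp) :: rest, i, d =>
    let i' := pvAdvA bins dur bins.length i
    pvLoopA bins rest i' (d.modify (bins.getD i' 0) [] (· ++ [resp]))

def bin_data (data : List (Int × Int)) (bins : List Int) : List (Int × List Int) :=
  let sdata := PySem.List.sorted data (fun x => x.1)
  let d0 := bins.foldl (fun d b => d.insert b ([] : List Int)) PySem.Dict.empty
  (pvLoopA bins sdata 0 d0).items

-- ===== PORT B =====
-- the hand-written `while lo < hi` binary search of Source B, step for step; fuel len(bins) ≥ hi - lo suffices.
def pvBisectB (bins : List Int) (dur : Int) : Nat → Nat → Nat → Nat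
  | 0, lo, _ => lo
  | fuel+1, lo, hi =>
    if lo < hi then
      let mid := (lo + hi) / 2
      if bins.getD mid 0 ≤ dur then pvBisectB bins dur fuel (mid+1) hi
      else pvBisectB bins dur fuel lo mid
    else lo

-- the body of Source B's for-loop: rs_per_dur[bins[min(lo - 1, last)]].append(resp)
-- (pyGetD is Python's indexing including the negative-index case Source B can reach outside Pre_).
def pvStepB (bins : List Int) (d : PySem.Dict Int (List Int)) (p : Int × Int) : PySem.Dict Int (List Int) :=
  let lo := pvBisectB bins p.1 bins.length 0 bins.length
  d.modify (PySem.List.pyGetD bins (min ((lo : Int) - 1) ((bins.length : Int) - 2)) 0) [] (· ++ [p.2])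

def bin_data_alt (data : List (Int × Int)) (bins : List Int) : List (Int × List Int) :=
  let d0 := bins.foldl (fun d b => d.insert b ([] : List Int)) PySem.Dict.empty
  ((PySem.List.sorted data (fun x => x.1)).foldl (pvStepB bins) d0).items

-- ===== PRECONDITION & SPEC =====
-- Pre_ excludes exactly the inputs on which A raises (unsorted or fewer than 2 bin edges, an out-of-range
-- duration, or a duration equal to the last edge reached while the sweep pointer lags behind the last bin)
-- and the degenerate bins with 3+ edges whose last edge is duplicated while data contains that edge, where
-- A's choice of which duplicate-valued bin receives the max durations is an accident of its pointer state.
def Pre_bin_data (data : List (Int × Int)) (bins : List Int) : Prop :=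
  2 ≤ bins.length ∧ bins.Pairwise (· ≤ ·) ∧
  (∀ p ∈ data, bins.getD 0 0 ≤ p.1 ∧ p.1 ≤ bins.getD (bins.length - 1) 0) ∧
  ((∀ p ∈ data, p.1 ≠ bins.getD (bins.length - 1) 0) ∨ bins.length = 2 ∨
   (bins.getD (bins.length - 2) 0 < bins.getD (bins.length - 1) 0 ∧
    ∃ p ∈ data, bins.getD (bins.length - 2) 0 ≤ p.1 ∧ p.1 < bins.getD (bins.length - 1) 0))
instance (data : List (Int × Int)) (bins : List Int) : Decidable (Pre_bin_data data bins) := by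
  unfold Pre_bin_data; infer_instance

def pvWitness_bin_data : (List (Int × Int)) × List Int := ([(1, 5), (3, 7), (2, 5)], [0, 2, 4])

def Spec_bin_data (data : List (Int × Int)) (bins : List Int) (out : List (Int × List Int)) : Prop := out = bin_data_alt data bins
instance (data : List (Int × Int)) (bins : List Int) (out : List (Int × List Int)) : Decidable (Spec_bin_data data bins out) := by unfold Spec_bin_data; infer_instance

-- ===== CLAIM (what is proved, stated in full; the proofs are below) =====
def Claim_equal_bin_data : Prop := ∀ (data : List (Int × Int)) (bins : List Int), Dom_bin_data data bins → Pre_bin_data data bins → Spec_bin_data data bins (bin_data data bins)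

-- ===== LEMMAS AND PROOFS =====

theorem pvChar (bins : List Int) (dur : Int) (hs : bins.Pairwise (· ≤ ·))
    (j : Nat) (hj : j < bins.length) :
    bins[j] ≤ dur ↔ j < PySem.List.bisectRight bins dur := by
  obtain ⟨h1, h2, h3⟩ := PySem.List.bisectRight_spec bins dur hs
  constructor
  · intro h; by_contra hc
    exact absurd (h3 j hj (by omega)) (by omega)
  · intro h; exact h2 j hj h

theorem pvLast_eq (bins : List Int) (h : bins ≠ []) :
    pvLastA bins = bins.getD (bins.length - 1) 0 := by
  unfold pvLastA
  rw [PySem.List.pyGetD_neg_one bins 0 h, List.getLast_eq_getElem,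
    List.getD_eq_getElem bins 0 (by have := List.length_pos_iff.mpr h; omega)]

theorem pvMono (bins : List Int) (hs : bins.Pairwise (· ≤ ·)) {i j : Nat}
    (hij : i ≤ j) (hj : j < bins.length) : bins[i]'(by omega) ≤ bins[j] := by
  rcases Nat.eq_or_lt_of_le hij with h | h
  · subst h; exact le_refl _
  · exact List.pairwise_iff_getElem.mp hs i j (by omega) hj h

theorem pvBisect_last (bins : List Int) (dur : Int) (hs : bins.Pairwise (· ≤ ·))
    (hn : 1 ≤ bins.length) (hdur : bins.getD (bins.length - 1) 0 ≤ dur) :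
    PySem.List.bisectRight bins dur = bins.length := by
  have h1 := (PySem.List.bisectRight_spec bins dur hs).1
  rw [List.getD_eq_getElem bins 0 (by omega)] at hdur
  have := (pvChar bins dur hs (bins.length - 1) (by omega)).1 hdur
  omega

theorem pvAdvA_last (bins : List Int) (dur : Int) (h : dur = pvLastA bins)
    (fuel i : Nat) : pvAdvA bins dur fuel i = i := by
  cases fuel with
  | zero => rfl
  | succ f => simp [pvAdvA, h]

theorem pvAdvA_eq (bins : List Int) (dur : Int) (hs : bins.Pairwise (· ≤ ·))
    (hne : dur ≠ pvLastA bins)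
    (hc : PySem.List.bisectRight bins dur < bins.length) :
    ∀ fuel i, i < PySem.List.bisectRight bins dur →
      PySem.List.bisectRight bins dur - 1 - i ≤ fuel →
      pvAdvA bins dur fuel i = PySem.List.bisectRight bins dur - 1 := by
  intro fuel
  induction fuel with
  | zero => intro i h1 h2; simp [pvAdvA]; omega
  | succ f ih =>
    intro i h1 h2
    by_cases hlt : i + 1 < PySem.List.bisectRight bins dur
    · have hle : bins.getD (i+1) 0 ≤ dur := by
        rw [List.getD_eq_getElem bins 0 (by omega)]
        exact (pvChar bins dur hs (i+1) (by omega)).2 hlt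
      have hcond : bins.getD (i+1) 0 ≤ dur ∧ dur ≠ pvLastA bins := ⟨hle, hne⟩
      simp only [pvAdvA, if_pos hcond]
      exact ih (i+1) hlt (by omega)
    · have hi1 : i + 1 = PySem.List.bisectRight bins dur := by omega
      have hgt : ¬ bins.getD (i+1) 0 ≤ dur := by
        rw [List.getD_eq_getElem bins 0 (by omega)]
        intro h
        exact absurd ((pvChar bins dur hs (i+1) (by omega)).1 h) (by omega)
      have hcond : ¬ (bins.getD (i+1) 0 ≤ dur ∧ dur ≠ pvLastA bins) := by tauto
      simp only [pvAdvA, if_neg hcond]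
      omega

theorem pvBisectB_eq (bins : List Int) (dur : Int) (hs : bins.Pairwise (· ≤ ·)) :
    ∀ fuel lo hi, lo ≤ PySem.List.bisectRight bins dur →
      PySem.List.bisectRight bins dur ≤ hi → hi ≤ bins.length → hi - lo ≤ fuel →
      pvBisectB bins dur fuel lo hi = PySem.List.bisectRight bins dur := by
  intro fuel
  induction fuel with
  | zero => intro lo hi h1 h2 h3 h4; simp [pvBisectB]; omega
  | succ f ih =>
    intro lo hi h1 h2 h3 h4
    by_cases hlh : lo < hi
    · simp only [pvBisectB, if_pos hlh]
      set c := PySem.List.bisectRight bins dur with hcdef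
      have hmid1 : lo ≤ (lo + hi) / 2 := by omega
      have hmid2 : (lo + hi) / 2 < hi := by omega
      by_cases hm : bins.getD ((lo + hi) / 2) 0 ≤ dur
      · simp only [if_pos hm]
        have hlt : (lo + hi) / 2 < c := by
          rw [List.getD_eq_getElem bins 0 (by omega)] at hm
          exact (pvChar bins dur hs _ (by omega)).1 hm
        exact ih _ hi (by omega) h2 h3 (by omega)
      · simp only [if_neg hm]
        have hge : c ≤ (lo + hi) / 2 := by
          by_contra hcon
          have : bins[(lo + hi) / 2] ≤ dur := (pvChar bins dur hs _ (by omega)).2 (by omega)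
          rw [List.getD_eq_getElem bins 0 (by omega)] at hm
          exact hm this
        exact ih lo _ h1 hge (by omega) (by omega)
    · have h5 : lo = hi := by omega
      simp only [pvBisectB, if_neg hlh]
      omega

theorem pvLoop_eq (bins : List Int) (hs : bins.Pairwise (· ≤ ·)) (hn : 2 ≤ bins.length) :
    ∀ (rest : List (Int × Int)) (i : Nat) (d : PySem.Dict Int (List Int)),
      rest.Pairwise (fun a b => a.1 ≤ b.1) →
      (∀ p ∈ rest, bins.getD 0 0 ≤ p.1 ∧ p.1 ≤ bins.getD (bins.length - 1) 0) →
      i + 1 < bins.length →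
      (∀ p ∈ rest, bins.getD i 0 ≤ p.1) →
      ((∀ p ∈ rest, p.1 ≠ bins.getD (bins.length - 1) 0) ∨ bins.length = 2 ∨
        (∃ p ∈ rest, bins.getD (bins.length - 2) 0 ≤ p.1 ∧ p.1 < bins.getD (bins.length - 1) 0) ∨
        bins.getD (bins.length - 2) 0 ≤ bins.getD i 0) →
      pvLoopA bins rest i d = rest.foldl (pvStepB bins) d := by
  intro rest
  induction rest with
  | nil => intro i d _ _ _ _ _; rfl
  | cons hd tl ih =>
    obtain ⟨dur, resp⟩ := hd
    intro i d hpw hrange hi hlow hdisj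
    have hne : bins ≠ [] := by intro h; rw [h] at hn; simp at hn
    have hd_range := hrange _ (List.mem_cons_self)
    have hd_low := hlow _ (List.mem_cons_self)
    have htl_le : ∀ p ∈ tl, dur ≤ p.1 := by
      intro p hp; exact (List.pairwise_cons.mp hpw).1 p hp
    have hpw' := (List.pairwise_cons.mp hpw).2
    -- the key B assigns to this element
    have hstep : ∀ d', pvStepB bins d' (dur, resp) =
        d'.modify (PySem.List.pyGetD bins
          (min (((pvBisectB bins dur bins.length 0 bins.length : Nat) : Int) - 1)
               ((bins.length : Int) - 2)) 0) [] (· ++ [resp]) := by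
      intro d'; rfl
    by_cases hM : dur = bins.getD (bins.length - 1) 0
    · -- dur = bins[-1]: A's pointer does not move; B clamps to the last bin
      have hc : PySem.List.bisectRight bins dur = bins.length :=
        pvBisect_last bins dur hs (by omega) (hM ▸ le_refl _)
      have hbis : pvBisectB bins dur bins.length 0 bins.length = bins.length := by
        rw [pvBisectB_eq bins dur hs bins.length 0 bins.length (by omega) (by omega) le_rfl (by omega), hc]
      have hadv : pvAdvA bins dur bins.length i = i :=
        pvAdvA_last bins dur (by rw [pvLast_eq bins hne]; exact hM) _ _
      have hkeyB : PySem.List.pyGetD bins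
          (min (((pvBisectB bins dur bins.length 0 bins.length : Nat) : Int) - 1)
               ((bins.length : Int) - 2)) 0 = bins.getD (bins.length - 2) 0 := by
        rw [hbis]
        have hmin : min (((bins.length : Nat) : Int) - 1) ((bins.length : Int) - 2)
            = ((bins.length : Int) - 2) := by omega
        rw [hmin, PySem.List.pyGetD_eq_getElem bins 0 (by omega) (by omega),
          List.getD_eq_getElem bins 0 (by omega)]
        congr 1
        omega
      -- resolve the invariant disjunction
      rcases hdisj with h1 | h2 | h3 | h4
      · exact absurd hM (h1 _ (List.mem_cons_self))
      · -- bins.length = 2, so i = 0 = length - 2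
        have hi0 : i = 0 := by omega
        have hkeyA : bins.getD i 0 = bins.getD (bins.length - 2) 0 := by
          rw [hi0, h2]
        simp only [pvLoopA, List.foldl_cons, hadv, hstep, hkeyB, hkeyA]
        exact ih i _ hpw' (fun p hp => hrange p (List.mem_cons_of_mem _ hp)) hi
          (fun p hp => hlow p (List.mem_cons_of_mem _ hp)) (Or.inr (Or.inl h2))
      · exfalso
        obtain ⟨p, hp, hp1, hp2⟩ := h3
        rcases List.mem_cons.mp hp with rfl | hp'
        · exact absurd hM (by omega)
        · have := htl_le p hp'
          omega
      · have hkeyA : bins.getD i 0 = bins.getD (bins.length - 2) 0 := by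
          have h5 : bins.getD i 0 ≤ bins.getD (bins.length - 2) 0 := by
            rw [List.getD_eq_getElem bins 0 (by omega), List.getD_eq_getElem bins 0 (by omega)]
            exact pvMono bins hs (by omega) (by omega)
          omega
        simp only [pvLoopA, List.foldl_cons, hadv, hstep, hkeyB, hkeyA]
        exact ih i _ hpw' (fun p hp => hrange p (List.mem_cons_of_mem _ hp)) hi
          (fun p hp => hlow p (List.mem_cons_of_mem _ hp)) (Or.inr (Or.inr (Or.inr h4)))
    · -- dur < bins[-1]: both sides file it under bins[bisectRight - 1]
      have hdurlt : dur < bins.getD (bins.length - 1) 0 := lt_of_le_of_ne hd_range.2 hM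
      set c := PySem.List.bisectRight bins dur with hcdef
      have hc1 : 1 ≤ c := by
        have h0 := hd_range.1
        rw [List.getD_eq_getElem bins 0 (by omega)] at h0
        have := (pvChar bins dur hs 0 (by omega)).1 h0
        omega
      have hcn : c ≤ bins.length - 1 := by
        by_contra hcon
        have := (pvChar bins dur hs (bins.length - 1) (by omega)).2 (by omega)
        rw [List.getD_eq_getElem bins 0 (by omega)] at hdurlt
        omega
      have hic : i < c := by
        have h0 := hd_low
        rw [List.getD_eq_getElem bins 0 (by omega)] at h0
        have := (pvChar bins dur hs i (by omega)).1 h0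
        omega
      have hlastne : dur ≠ pvLastA bins := by rw [pvLast_eq bins hne]; exact hM
      have hadv : pvAdvA bins dur bins.length i = c - 1 :=
        pvAdvA_eq bins dur hs hlastne (by omega) bins.length i hic (by omega)
      have hbis : pvBisectB bins dur bins.length 0 bins.length = c :=
        pvBisectB_eq bins dur hs bins.length 0 bins.length (by omega)
          (by have := (PySem.List.bisectRight_spec bins dur hs).1; omega) le_rfl (by omega)
      have hkeyB : PySem.List.pyGetD bins
          (min (((pvBisectB bins dur bins.length 0 bins.length : Nat) : Int) - 1)
               ((bins.length : Int) - 2)) 0 = bins.getD (c - 1) 0 := by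
        rw [hbis]
        have hmin : min (((c : Nat) : Int) - 1) ((bins.length : Int) - 2) = ((c : Int) - 1) := by
          omega
        rw [hmin, PySem.List.pyGetD_eq_getElem bins 0 (by omega) (by omega),
          List.getD_eq_getElem bins 0 (by omega)]
        congr 1
        omega
      have hkeyle : bins.getD (c - 1) 0 ≤ dur := by
        rw [List.getD_eq_getElem bins 0 (by omega)]
        exact (pvChar bins dur hs (c-1) (by omega)).2 (by omega)
      simp only [pvLoopA, List.foldl_cons, hadv, hstep, hkeyB]
      refine ih (c - 1) _ hpw' (fun p hp => hrange p (List.mem_cons_of_mem _ hp)) (by omega)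
        (fun p hp => le_trans hkeyle (htl_le p hp)) ?_
      -- preservation of the last-bin disjunction
      rcases hdisj with h1 | h2 | h3 | h4
      · exact Or.inl (fun p hp => h1 p (List.mem_cons_of_mem _ hp))
      · exact Or.inr (Or.inl h2)
      · obtain ⟨p, hp, hp1, hp2⟩ := h3
        rcases List.mem_cons.mp hp with rfl | hp'
        · -- the witness is this element: the pointer lands exactly on the last bin
          refine Or.inr (Or.inr (Or.inr ?_))
          have hn2 : bins.getD (bins.length - 2) 0 ≤ dur := hp1
          rw [List.getD_eq_getElem bins 0 (by omega)] at hn2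
          have := (pvChar bins dur hs (bins.length - 2) (by omega)).1 hn2
          have hceq : c - 1 = bins.length - 2 := by omega
          rw [hceq]
        · exact Or.inr (Or.inr (Or.inl ⟨p, hp', hp1, hp2⟩))
      · refine Or.inr (Or.inr (Or.inr ?_))
        have h5 : bins.getD (bins.length - 2) 0 ≤ dur := le_trans h4 hd_low
        rw [List.getD_eq_getElem bins 0 (by omega)] at h5
        have := (pvChar bins dur hs (bins.length - 2) (by omega)).1 h5
        have hceq : c - 1 = bins.length - 2 := by omega
        rw [hceq]

-- ===== VERDICT (by name: the statement is the Claim_ definition above) =====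
theorem bin_data_spec : Claim_equal_bin_data := by
  intro data bins _ hpre
  obtain ⟨hn, hs, hrange, hdisj⟩ := hpre
  unfold Spec_bin_data bin_data bin_data_alt
  refine congrArg PySem.Dict.items ?_
  apply pvLoop_eq bins hs hn
  · exact PySem.List.sorted_pairwise data (fun x => x.1)
  · intro p hp
    exact hrange p ((PySem.List.mem_sorted data (fun x => x.1) false p).1 hp)
  · omega
  · intro p hp
    exact (hrange p ((PySem.List.mem_sorted data (fun x => x.1) false p).1 hp)).1
  · rcases hdisj with h1 | h2 | ⟨hlt, p, hp, h3, h4⟩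
    · exact Or.inl (fun p hp => h1 p ((PySem.List.mem_sorted data (fun x => x.1) false p).1 hp))
    · exact Or.inr (Or.inl h2)
    · exact Or.inr (Or.inr (Or.inl ⟨p, (PySem.List.mem_sorted data (fun x => x.1) false p).2 hp, h3, h4⟩))
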